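-- pv_equiv track=rewrite | github.com/jgibson2/TFAinference_nonlinear | archive/mysticRealMain.py | createParamsBL
-- ===== SOURCE A (Python) =====
-- def createParamsBL(signedBinaryCS, binaryTFA):
--     params = []
--     numGenes = len(signedBinaryCS)
--     numTFs = len(signedBinaryCS[0])
--     numSamples = len(binaryTFA[0])
--     for i in range(numSamples):
--         for j in range(numGenes):
--             for k in range(numTFs):
--                 if i == 0:
--                     params.append("cs[" + str(j) + "," + str(k) + "]")
--                 if j == 0:
--                     params.append("tfa[" + str(k) + "," + str(i) + "]")
--     return params
-- ===== SOURCE B (Python) =====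
-- def createParamsBL(signedBinaryCS, binaryTFA):
--     numGenes = len(signedBinaryCS)
--     numTFs = len(signedBinaryCS[0])
--     numSamples = len(binaryTFA[0])
--     if numSamples == 0:
--         return []
--     params = []
--     for k in range(numTFs):
--         params.append("cs[0," + str(k) + "]")
--         params.append("tfa[" + str(k) + ",0]")
--     for j in range(1, numGenes):
--         for k in range(numTFs):
--             params.append("cs[" + str(j) + "," + str(k) + "]")
--     for i in range(1, numSamples):
--         for k in range(numTFs):
--             params.append("tfa[" + str(k) + "," + str(i) + "]")
--     return params
-- ===== Notes on version B (the rewrite author's own statement) =====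
-- stated objective: faster
-- what changed: Replaces the S*G*T triple loop (whose inner conditions fire only for i==0 or j==0) by three direct loops that emit exactly the appended entries: the interleaved cs/tfa block for i=0,j=0, then the remaining cs rows, then the remaining tfa columns.
import Mathlib
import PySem

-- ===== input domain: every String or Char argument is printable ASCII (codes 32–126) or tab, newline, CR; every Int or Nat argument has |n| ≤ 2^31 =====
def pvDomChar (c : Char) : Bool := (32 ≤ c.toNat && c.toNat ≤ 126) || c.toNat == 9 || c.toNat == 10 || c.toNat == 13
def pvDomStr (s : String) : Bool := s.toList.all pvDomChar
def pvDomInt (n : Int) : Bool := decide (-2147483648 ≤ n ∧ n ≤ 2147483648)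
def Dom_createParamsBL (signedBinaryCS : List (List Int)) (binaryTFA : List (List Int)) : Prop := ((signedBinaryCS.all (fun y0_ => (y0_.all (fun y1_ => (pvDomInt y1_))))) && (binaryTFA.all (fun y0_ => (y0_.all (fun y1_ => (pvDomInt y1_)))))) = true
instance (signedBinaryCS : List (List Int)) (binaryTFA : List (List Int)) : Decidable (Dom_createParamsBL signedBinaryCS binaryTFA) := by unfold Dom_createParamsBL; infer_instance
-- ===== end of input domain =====

-- B emits only the entries A actually appends (i=0 or j=0), in the same order: asymptotically faster.

-- ===== PORT A =====
-- "cs[" + str(j) + "," + str(k) + "]"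
def pvCsStr (j k : Nat) : String := "cs[" ++ PySem.Int.toStr (j : Int) ++ "," ++ PySem.Int.toStr (k : Int) ++ "]"
-- "tfa[" + str(k) + "," + str(i) + "]"
def pvTfaStr (k i : Nat) : String := "tfa[" ++ PySem.Int.toStr (k : Int) ++ "," ++ PySem.Int.toStr (i : Int) ++ "]"

-- literal transliteration of A; xs[0] is PySem.List.pyGet?, totalised with getD [] on the
-- empty-list case that Pre_createParamsBL excludes (Python raises IndexError there)
def createParamsBL (signedBinaryCS : List (List Int)) (binaryTFA : List (List Int)) : List String :=
  let numGenes := signedBinaryCS.length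
  let numTFs := ((PySem.List.pyGet? signedBinaryCS 0).getD []).length
  let numSamples := ((PySem.List.pyGet? binaryTFA 0).getD []).length
  (List.range numSamples).foldl (fun params i =>
    (List.range numGenes).foldl (fun params j =>
      (List.range numTFs).foldl (fun params k =>
        let params := if i = 0 then params ++ [pvCsStr j k] else params
        if j = 0 then params ++ [pvTfaStr k i] else params) params) params) []

-- ===== PORT B =====
-- transliteration of Source B: three direct emitting loops, no dead iterations
def createParamsBL_alt (signedBinaryCS : List (List Int)) (binaryTFA : List (List Int)) : List String :=
  let numGenes := signedBinaryCS.length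
  let numTFs := ((PySem.List.pyGet? signedBinaryCS 0).getD []).length
  let numSamples := ((PySem.List.pyGet? binaryTFA 0).getD []).length
  if numSamples = 0 then []
  else
    ((List.range numTFs).flatMap (fun k => [pvCsStr 0 k, pvTfaStr k 0]))
    ++ ((List.range (numGenes - 1)).flatMap (fun j => (List.range numTFs).map (fun k => pvCsStr (j + 1) k)))
    ++ ((List.range (numSamples - 1)).flatMap (fun i => (List.range numTFs).map (fun k => pvTfaStr k (i + 1))))

-- ===== PRECONDITION & SPEC =====
-- Pre_ excludes exactly the inputs where A raises IndexError: signedBinaryCS or binaryTFA empty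
def Pre_createParamsBL (signedBinaryCS : List (List Int)) (binaryTFA : List (List Int)) : Prop :=
  signedBinaryCS ≠ [] ∧ binaryTFA ≠ []
instance (signedBinaryCS : List (List Int)) (binaryTFA : List (List Int)) : Decidable (Pre_createParamsBL signedBinaryCS binaryTFA) := by unfold Pre_createParamsBL; infer_instance

def pvWitness_createParamsBL : List (List Int) × List (List Int) := ([[1, 0], [0, 1]], [[1, 0, 1]])

def Spec_createParamsBL (signedBinaryCS : List (List Int)) (binaryTFA : List (List Int)) (out : List String) : Prop := out = createParamsBL_alt signedBinaryCS binaryTFA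
instance (signedBinaryCS : List (List Int)) (binaryTFA : List (List Int)) (out : List String) : Decidable (Spec_createParamsBL signedBinaryCS binaryTFA out) := by unfold Spec_createParamsBL; infer_instance

-- ===== CLAIM (what is proved, stated in full; the proofs are below) =====
def Claim_equal_createParamsBL : Prop := ∀ (signedBinaryCS : List (List Int)) (binaryTFA : List (List Int)), Dom_createParamsBL signedBinaryCS binaryTFA → Pre_createParamsBL signedBinaryCS binaryTFA → Spec_createParamsBL signedBinaryCS binaryTFA (createParamsBL signedBinaryCS binaryTFA)

-- ===== LEMMAS AND PROOFS =====

-- the innermost k-loop of A extends the accumulator by a flatMap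
theorem innerA (T i j : Nat) (acc : List String) :
    (List.range T).foldl (fun params k =>
        let params := if i = 0 then params ++ [pvCsStr j k] else params
        if j = 0 then params ++ [pvTfaStr k i] else params) acc
      = acc ++ (List.range T).flatMap (fun k =>
          (if i = 0 then [pvCsStr j k] else []) ++ (if j = 0 then [pvTfaStr k i] else [])) := by
  have h : ∀ (acc : List String) (k : Nat),
      (let params := if i = 0 then acc ++ [pvCsStr j k] else acc
       if j = 0 then params ++ [pvTfaStr k i] else params)
      = acc ++ ((if i = 0 then [pvCsStr j k] else []) ++ (if j = 0 then [pvTfaStr k i] else [])) := by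
    intro acc k
    by_cases hi : i = 0 <;> by_cases hj : j = 0 <;> simp [hi, hj]
  calc (List.range T).foldl _ acc
      = (List.range T).foldl (fun params k => params ++ ((if i = 0 then [pvCsStr j k] else []) ++ (if j = 0 then [pvTfaStr k i] else []))) acc := by
        apply PySem.List.foldl_congr_mem; intro b a _; exact h b a
    _ = _ := PySem.List.foldl_append_eq_flatMap _ _ _

-- the j-loop of A, after rewriting the k-loop, extends by a flatMap too
theorem middleA (T G i : Nat) (acc : List String) :
    (List.range G).foldl (fun params j =>
        (List.range T).foldl (fun params k =>
          let params := if i = 0 then params ++ [pvCsStr j k] else params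
          if j = 0 then params ++ [pvTfaStr k i] else params) params) acc
      = acc ++ (List.range G).flatMap (fun j => (List.range T).flatMap (fun k =>
          (if i = 0 then [pvCsStr j k] else []) ++ (if j = 0 then [pvTfaStr k i] else []))) := by
  calc (List.range G).foldl _ acc
      = (List.range G).foldl (fun params j => params ++ (List.range T).flatMap (fun k =>
          (if i = 0 then [pvCsStr j k] else []) ++ (if j = 0 then [pvTfaStr k i] else []))) acc := by
        apply PySem.List.foldl_congr_mem; intro b a _; exact innerA T i a b
    _ = _ := PySem.List.foldl_append_eq_flatMap _ _ _

-- A in flatMap normal form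
theorem A_flat (S G T : Nat) :
    (List.range S).foldl (fun params i =>
      (List.range G).foldl (fun params j =>
        (List.range T).foldl (fun params k =>
          let params := if i = 0 then params ++ [pvCsStr j k] else params
          if j = 0 then params ++ [pvTfaStr k i] else params) params) params) []
    = (List.range S).flatMap (fun i => (List.range G).flatMap (fun j => (List.range T).flatMap (fun k =>
        (if i = 0 then [pvCsStr j k] else []) ++ (if j = 0 then [pvTfaStr k i] else [])))) := by
  calc (List.range S).foldl _ []
      = (List.range S).foldl (fun params i => params ++ (List.range G).flatMap (fun j => (List.range T).flatMap (fun k =>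
          (if i = 0 then [pvCsStr j k] else []) ++ (if j = 0 then [pvTfaStr k i] else [])))) [] := by
        apply PySem.List.foldl_congr_mem; intro b a _; exact middleA T G a b
    _ = _ := by rw [PySem.List.foldl_append_eq_flatMap]; simp

theorem main_eq (G T S : Nat) (hG : 0 < G) (hS : 0 < S) :
    (List.range S).flatMap (fun i => (List.range G).flatMap (fun j => (List.range T).flatMap (fun k =>
        (if i = 0 then [pvCsStr j k] else []) ++ (if j = 0 then [pvTfaStr k i] else []))))
    = ((List.range T).flatMap (fun k => [pvCsStr 0 k, pvTfaStr k 0]))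
      ++ ((List.range (G - 1)).flatMap (fun j => (List.range T).map (fun k => pvCsStr (j + 1) k)))
      ++ ((List.range (S - 1)).flatMap (fun i => (List.range T).map (fun k => pvTfaStr k (i + 1)))) := by
  obtain ⟨g, rfl⟩ : ∃ g, G = g + 1 := ⟨G - 1, (Nat.succ_pred_eq_of_pos hG).symm⟩
  obtain ⟨s, rfl⟩ : ∃ s, S = s + 1 := ⟨S - 1, (Nat.succ_pred_eq_of_pos hS).symm⟩
  rw [List.range_succ_eq_map, List.range_succ_eq_map]
  have hnil : (List.range g).flatMap (fun _ => (List.range T).flatMap (fun _ => ([] : List String))) = [] :=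
    List.flatMap_eq_nil_iff.mpr (fun x _ => List.flatMap_eq_nil_iff.mpr (fun y _ => rfl))
  simp [List.flatMap_cons, List.flatMap_map, hnil]
  simp [← List.map_eq_flatMap]

-- ===== VERDICT (by name: the statement is the Claim_ definition above) =====
theorem createParamsBL_spec : Claim_equal_createParamsBL := by
  intro sbcs btfa _ hpre
  unfold Spec_createParamsBL createParamsBL createParamsBL_alt
  obtain ⟨h1, h2⟩ := hpre
  simp only []
  set G := sbcs.length with hGdef
  set T := ((PySem.List.pyGet? sbcs 0).getD []).length
  set S := ((PySem.List.pyGet? btfa 0).getD []).length with hSdef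
  have hG : 0 < G := List.length_pos_iff.mpr h1
  by_cases hS : S = 0
  · simp [hS]
  · rw [if_neg hS, A_flat, main_eq G T S hG (Nat.pos_of_ne_zero hS)]
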